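-- pv_equiv track=rewrite | github.com/dgswilkins/ThrEd4 | Tools/analyze_functions.py | count_lines_in_function
-- ===== SOURCE A (Python) =====
-- from typing import List, Tuple
--
-- def count_lines_in_function(lines: List[str], start_idx: int) -> int:
--     """
--     Count lines in a function starting from the opening brace.
--     Returns the number of lines including the closing brace.
--     """
--     brace_count = 0
--     line_count = 0
--     in_function = False
--
--     for i in range(start_idx, len(lines)):
--         line = lines[i]
--         # Count opening and closing braces
--         brace_count += line.count('{')
--         brace_count -= line.count('}')
--
--         if brace_count > 0:
--             in_function = True
--
--         if in_function:
--             line_count += 1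
--
--         if in_function and brace_count == 0:
--             break
--
--     return line_count
-- ===== SOURCE B (Python) =====
-- from itertools import accumulate
--
--
-- def count_lines_in_function(lines, start_idx):
--     """
--     Count lines in a function starting from the opening brace.
--     Returns the number of lines including the closing brace.
--
--     Table-driven: build the running brace balance for lines[start_idx:],
--     then locate the start (first net-positive balance) and the end
--     (first return to zero after the start) by index search.
--     """
--     deltas = [line.count('{') - line.count('}') for line in lines[start_idx:]]
--     bal = list(accumulate(deltas))
--     start = next((i for i, b in enumerate(bal) if b > 0), None)
--     if start is None:
--         return 0
--     rest = bal[start:]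
--     for j, b in enumerate(rest):
--         if b == 0:
--             return j + 1
--     return len(rest)
-- ===== Notes on version B (the rewrite author's own statement) =====
-- stated objective: alternative
-- what changed: Replaces A's single flag-driven loop with three separate passes: build the per-line brace-delta table, form its running balance with itertools.accumulate, then find the start (first positive balance) and end (first zero after the start) by index search.
-- outside the precondition, e.g. on count_lines_in_function(['}', '{'], -1): A returns 2, B returns 1; on count_lines_in_function(['x'], -3): A raises IndexError, B returns 0
import Mathlib
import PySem

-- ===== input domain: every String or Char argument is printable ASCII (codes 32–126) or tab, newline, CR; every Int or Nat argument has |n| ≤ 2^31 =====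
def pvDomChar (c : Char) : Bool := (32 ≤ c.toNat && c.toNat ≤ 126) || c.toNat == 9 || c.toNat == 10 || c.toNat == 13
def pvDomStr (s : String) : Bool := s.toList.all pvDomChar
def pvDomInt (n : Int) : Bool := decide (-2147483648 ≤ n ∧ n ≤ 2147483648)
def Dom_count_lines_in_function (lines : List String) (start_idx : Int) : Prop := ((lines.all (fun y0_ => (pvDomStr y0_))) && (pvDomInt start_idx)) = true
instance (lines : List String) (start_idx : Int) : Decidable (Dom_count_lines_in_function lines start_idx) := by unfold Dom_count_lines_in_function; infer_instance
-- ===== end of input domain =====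

-- B replaces A's flag-driven loop by building the running brace-balance table and
-- locating start/end by index search (same cost, different decomposition).

-- ===== PORT A =====
-- the for-loop over range(start_idx, len(lines)) with break; state (brace_count, line_count, in_function)
def pvLoopA (lines : List String) : List Int → Int → Int → Bool → Int
  | [], _, line_count, _ => line_count
  | i :: rest, brace_count, line_count, in_function =>
    let line := (PySem.List.pyGet? lines i).getD ""
    let brace_count' := brace_count + (PySem.Str.count line "{" : Int) - (PySem.Str.count line "}" : Int)
    let in_function' := if 0 < brace_count' then true else in_function
    let line_count' := if in_function' then line_count + 1 else line_count
    if in_function' && brace_count' == 0 then line_count'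
    else pvLoopA lines rest brace_count' line_count' in_function'

def count_lines_in_function (lines : List String) (start_idx : Int) : Int :=
  pvLoopA lines (PySem.List.pyRange start_idx lines.length 1) 0 0 false

-- ===== PORT B =====
-- list(accumulate(deltas))
def pvAccum : Int → List Int → List Int
  | _, [] => []
  | c, d :: ds => (c + d) :: pvAccum (c + d) ds

def count_lines_in_function_alt (lines : List String) (start_idx : Int) : Int :=
  let deltas := (PySem.List.slice lines (some start_idx) none).map
    (fun line => (PySem.Str.count line "{" : Int) - (PySem.Str.count line "}" : Int))
  let bal := pvAccum 0 deltas
  match bal.findIdx? (fun b => decide (0 < b)) with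
  | none => 0
  | some start =>
    let rest := bal.drop start
    match rest.findIdx? (fun b => b == 0) with
    | some j => (j : Int) + 1
    | none => (rest.length : Int)

-- ===== PRECONDITION & SPEC =====
-- Pre_ restricts to the natural domain of non-negative start indices: for start_idx < 0
-- A raises IndexError when start_idx < -len(lines), and otherwise its negative-index
-- wraparound accidentally re-reads lines, while B uses Python slice semantics there.
def Pre_count_lines_in_function (lines : List String) (start_idx : Int) : Prop :=
  0 ≤ start_idx

instance (lines : List String) (start_idx : Int) : Decidable (Pre_count_lines_in_function lines start_idx) := by
  unfold Pre_count_lines_in_function; infer_instance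

def pvWitness_count_lines_in_function : List String × Int :=
  (["int f() {", "  return 0;", "}"], 0)

def Spec_count_lines_in_function (lines : List String) (start_idx : Int) (out : Int) : Prop := out = count_lines_in_function_alt lines start_idx
instance (lines : List String) (start_idx : Int) (out : Int) : Decidable (Spec_count_lines_in_function lines start_idx out) := by unfold Spec_count_lines_in_function; infer_instance

-- ===== CLAIM (what is proved, stated in full; the proofs are below) =====
def Claim_equal_count_lines_in_function : Prop := ∀ (lines : List String) (start_idx : Int), Dom_count_lines_in_function lines start_idx → Pre_count_lines_in_function lines start_idx → Spec_count_lines_in_function lines start_idx (count_lines_in_function lines start_idx)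

-- ===== LEMMAS AND PROOFS =====

-- per-line brace delta
def pvDelta (line : String) : Int :=
  (PySem.Str.count line "{" : Int) - (PySem.Str.count line "}" : Int)

-- B's core computation on a balance table
def pvBalCore (bal : List Int) : Int :=
  match bal.findIdx? (fun b => decide (0 < b)) with
  | none => 0
  | some start =>
    let rest := bal.drop start
    match rest.findIdx? (fun b => b == 0) with
    | some j => (j : Int) + 1
    | none => (rest.length : Int)

-- A's loop, expressed directly on the suffix of lines it visits
def pvLoopL : List String → Int → Int → Bool → Int
  | [], _, line_count, _ => line_count
  | l :: t, brace_count, line_count, in_function =>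
    let brace_count' := brace_count + pvDelta l
    let in_function' := if 0 < brace_count' then true else in_function
    let line_count' := if in_function' then line_count + 1 else line_count
    if in_function' && brace_count' == 0 then line_count'
    else pvLoopL t brace_count' line_count' in_function'

-- once in_function, the loop counts up to the first return of the balance to zero
lemma pvPhase2 (t : List String) :
    ∀ (bc lc : Int),
      pvLoopL t bc lc true
        = lc + (match (pvAccum bc (t.map pvDelta)).findIdx? (fun b => b == 0) with
                | some j => (j : Int) + 1
                | none => (t.length : Int)) := by
  induction t with
  | nil => intro bc lc; simp [pvLoopL, pvAccum, List.findIdx?, List.findIdx?.go]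
  | cons l t ih =>
    intro bc lc
    simp only [pvLoopL, pvAccum, List.map, List.findIdx?_cons]
    by_cases h0 : bc + pvDelta l = 0
    · simp [h0]
    · have hb : ((bc + pvDelta l) == 0) = false := by simp [h0]
      simp only [hb, Bool.and_false]
      simp only [show (if 0 < bc + pvDelta l then true else true) = true by simp, Bool.true_and,
        hb, if_false, cond_false]
      rw [ih]
      cases hfi : (pvAccum (bc + pvDelta l) (t.map pvDelta)).findIdx? (fun b => b == 0) with
      | none => simp [List.length_cons]; ring
      | some j => simp; ring

lemma pvAccum_length (ds : List Int) : ∀ c, (pvAccum c ds).length = ds.length := by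
  induction ds with
  | nil => intro c; rfl
  | cons d ds ih => intro c; simp [pvAccum, ih]

-- before in_function, the loop scans for the first net-positive balance
lemma pvPhase1 (t : List String) :
    ∀ (bc : Int),
      pvLoopL t bc 0 false = pvBalCore (pvAccum bc (t.map pvDelta)) := by
  induction t with
  | nil => intro bc; simp [pvLoopL, pvAccum, pvBalCore, List.findIdx?, List.findIdx?.go]
  | cons l t ih =>
    intro bc
    simp only [pvLoopL, pvAccum, List.map]
    by_cases hp : 0 < bc + pvDelta l
    · have h0 : ((bc + pvDelta l) == 0) = false := by simp; omega
      simp only [if_pos hp, Bool.true_and, h0, Bool.false_eq_true, if_false]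
      rw [pvPhase2]
      unfold pvBalCore
      rw [List.findIdx?_cons]
      simp only [List.findIdx?_cons, decide_eq_true_eq, hp, decide_true, cond_true,
        List.drop_zero, h0, cond_false]
      cases hfi : (pvAccum (bc + pvDelta l) (t.map pvDelta)).findIdx? (fun b => b == 0) with
      | none => simp [List.findIdx?_cons, h0, hfi, pvAccum_length]; omega
      | some j => simp [List.findIdx?_cons, h0, hfi]; ring
    · simp only [if_neg hp, Bool.false_and, Bool.false_eq_true, if_false]
      rw [ih]
      unfold pvBalCore
      rw [List.findIdx?_cons]
      have : (decide (0 < bc + pvDelta l)) = false := by simp [hp]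
      simp only [this, cond_false]
      cases hfi : (pvAccum (bc + pvDelta l) (t.map pvDelta)).findIdx? (fun b => decide (0 < b)) with
      | none => simp
      | some s => simp [List.drop_succ_cons]

-- A's indexed loop over range(s, len) is the structural loop over the dropped suffix
lemma pvLoopA_eq_loopL (lines : List String) :
    ∀ (k : Nat) (s : Nat) (bc lc : Int) (inf : Bool), lines.length - s ≤ k →
      pvLoopA lines (PySem.List.pyRange (s : Int) lines.length 1) bc lc inf
        = pvLoopL (lines.drop s) bc lc inf := by
  intro k
  induction k with
  | zero =>
    intro s bc lc inf hs
    rw [PySem.List.pyRange_one_eq_nil (by omega), List.drop_of_length_le (by omega)]; rfl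
  | succ k ih =>
    intro s bc lc inf hs
    by_cases hlt : s < lines.length
    · rw [PySem.List.pyRange_one_cons (by exact_mod_cast hlt)]
      have hget : PySem.List.pyGet? lines (s : Int) = some lines[s] := by
        simp [PySem.List.pyGet?_natCast, hlt]
      have hdrop : lines.drop s = lines[s] :: lines.drop (s + 1) :=
        List.drop_eq_getElem_cons hlt
      rw [hdrop]
      simp only [pvLoopA, pvLoopL, hget, Option.getD_some, pvDelta, add_sub_assoc]
      have : ((s : Int) + 1) = ((s + 1 : Nat) : Int) := by push_cast; ring
      rw [this]
      split <;> split <;> first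
        | rfl
        | exact ih (s + 1) _ _ _ (by omega)
    · rw [PySem.List.pyRange_one_eq_nil (by omega), List.drop_of_length_le (by omega)]; rfl

lemma pvAlt_eq (lines : List String) (start_idx : Int) (h : 0 ≤ start_idx) :
    count_lines_in_function_alt lines start_idx
      = pvBalCore (pvAccum 0 ((lines.drop start_idx.toNat).map pvDelta)) := by
  unfold count_lines_in_function_alt
  rw [PySem.List.slice_from lines h]
  rfl

-- ===== VERDICT (by name: the statement is the Claim_ definition above) =====
theorem count_lines_in_function_spec : Claim_equal_count_lines_in_function := by
  intro lines start_idx _ hpre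
  unfold Spec_count_lines_in_function count_lines_in_function
  have hs : ((start_idx.toNat : Nat) : Int) = start_idx := Int.toNat_of_nonneg hpre
  rw [← hs,
    pvLoopA_eq_loopL lines lines.length start_idx.toNat 0 0 false (by omega),
    pvPhase1, pvAlt_eq lines ((start_idx.toNat : Nat) : Int) (by positivity)]
  simp [List.map_drop]
  have h0 : 0 ≤ start_idx := hpre
  rw [show max start_idx 0 = start_idx from by omega]
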